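-- pv_equiv track=rewrite | github.com/z1long6/algo | Code-Random-Record/DP/DPBase.py | findMaxForm_2
-- ===== SOURCE A (Python) =====
-- def findMaxForm_2(strs: list[str], m: int, n: int) -> int:
--
--     dp = [[[0] * (n+1) for _ in range(m+1)] for _ in range(len(strs) + 1)]
--
--     for i, str_ in enumerate(strs):
--         cnt0 = str_.count('0')
--         cnt1 = len(str_) - cnt0
--         for j in range(m+1):
--             for k in range(n+1):
--                 if j >= cnt0 and k >= cnt1:
--                     dp[i+1][j][k] = max(dp[i][j][k], dp[i][j-cnt0][k-cnt1] + 1)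
--                 else:
--                     dp[i+1][j][k] = dp[i][j][k]
--
--     return dp[-1][-1][-1]
-- ===== SOURCE B (Python) =====
-- def findMaxForm_2(strs: list[str], m: int, n: int) -> int:
--     # single 2D table updated in place, items folded in with a reverse scan
--     dp = [[0] * (n + 1) for _ in range(m + 1)]
--     for s in strs:
--         cnt0 = s.count('0')
--         cnt1 = len(s) - cnt0
--         for j in range(m, cnt0 - 1, -1):
--             for k in range(n, cnt1 - 1, -1):
--                 dp[j][k] = max(dp[j][k], dp[j - cnt0][k - cnt1] + 1)
--     return dp[m][n]
-- ===== Notes on version B (the rewrite author's own statement) =====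
-- stated objective: idiomatic
-- what changed: A builds a (len(strs)+1)x(m+1)x(n+1) table with an explicit per-item dimension and forward scans; B keeps a single (m+1)x(n+1) grid updated in place, folding each string in with reversed j/k scans (the idiomatic 0/1-knapsack form), which drops the item dimension and the j>=cnt0/k>=cnt1 guard.
-- outside the precondition, e.g. on findMaxForm_2(['0'], -1, 2): A raises IndexError, B raises IndexError
import Mathlib
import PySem

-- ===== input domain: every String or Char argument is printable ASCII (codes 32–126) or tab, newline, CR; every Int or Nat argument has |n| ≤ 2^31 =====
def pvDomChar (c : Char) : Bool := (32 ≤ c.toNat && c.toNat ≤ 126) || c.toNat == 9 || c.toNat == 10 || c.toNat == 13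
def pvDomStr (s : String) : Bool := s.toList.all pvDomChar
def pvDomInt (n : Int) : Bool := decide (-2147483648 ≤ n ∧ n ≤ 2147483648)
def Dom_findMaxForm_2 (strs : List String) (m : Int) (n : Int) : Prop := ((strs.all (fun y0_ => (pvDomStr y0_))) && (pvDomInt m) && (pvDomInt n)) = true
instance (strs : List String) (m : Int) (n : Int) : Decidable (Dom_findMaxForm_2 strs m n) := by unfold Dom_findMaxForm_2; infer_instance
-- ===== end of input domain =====

-- B replaces A's (len+1)×(m+1)×(n+1) DP table by a single (m+1)×(n+1) grid updated in
-- place with reversed j/k scans (the idiomatic 0/1-knapsack form); return values proved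
-- equal whenever 0 ≤ m and 0 ≤ n.

-- ===== PORT A =====
-- dp[j][k] / dp[i][j][k] read-write helpers shared by both ports. The pyGetD defaults
-- are never hit on inputs admitted by Pre_ (every index is in range there, as the
-- lemmas below establish); out of Pre_ Python raises IndexError.
def pvGet2 (g : List (List Int)) (j k : Int) : Int :=
  PySem.List.pyGetD (PySem.List.pyGetD g j []) k 0

def pvSet2 (g : List (List Int)) (j k : Int) (v : Int) : List (List Int) :=
  PySem.List.pySetD g j (PySem.List.pySetD (PySem.List.pyGetD g j []) k v)

def pvGet3 (dp : List (List (List Int))) (i j k : Int) : Int :=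
  pvGet2 (PySem.List.pyGetD dp i []) j k

def pvSet3 (dp : List (List (List Int))) (i j k : Int) (v : Int) : List (List (List Int)) :=
  PySem.List.pySetD dp i (pvSet2 (PySem.List.pyGetD dp i []) j k v)

-- literal transliteration of A: build the full (len(strs)+1)×(m+1)×(n+1) zero table,
-- then fill layer i+1 from layer i with forward j,k loops; return dp[-1][-1][-1].
def findMaxForm_2 (strs : List String) (m : Int) (n : Int) : Int :=
  let dp : List (List (List Int)) :=
    (PySem.List.pyRange 0 ((strs.length : Int) + 1) 1).map (fun _ =>
      (PySem.List.pyRange 0 (m + 1) 1).map (fun _ => PySem.List.pyRepeat [(0 : Int)] (n + 1)))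
  let dp := (PySem.List.enumerate strs 0).foldl (fun dp p =>
      let i := p.1
      let cnt0 : Int := (PySem.Str.count p.2 "0" : Int)
      let cnt1 : Int := PySem.Str.len p.2 - cnt0
      (PySem.List.pyRange 0 (m + 1) 1).foldl (fun dp j =>
        (PySem.List.pyRange 0 (n + 1) 1).foldl (fun dp k =>
          if cnt0 ≤ j ∧ cnt1 ≤ k then
            pvSet3 dp (i + 1) j k
              (max (pvGet3 dp i j k) (pvGet3 dp i (j - cnt0) (k - cnt1) + 1))
          else
            pvSet3 dp (i + 1) j k (pvGet3 dp i j k)) dp) dp) dp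
  pvGet3 dp (-1) (-1) (-1)

-- ===== PORT B =====
-- literal transliteration of Source B: one 2D grid, each item folded in by
-- reversed scans j = m…cnt0, k = n…cnt1 updating dp[j][k] in place; return dp[m][n].
def findMaxForm_2_alt (strs : List String) (m : Int) (n : Int) : Int :=
  let dp : List (List Int) :=
    (PySem.List.pyRange 0 (m + 1) 1).map (fun _ => PySem.List.pyRepeat [(0 : Int)] (n + 1))
  let dp := strs.foldl (fun dp s =>
      let cnt0 : Int := (PySem.Str.count s "0" : Int)
      let cnt1 : Int := PySem.Str.len s - cnt0
      (PySem.List.pyRange m (cnt0 - 1) (-1)).foldl (fun dp j =>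
        (PySem.List.pyRange n (cnt1 - 1) (-1)).foldl (fun dp k =>
          pvSet2 dp j k
            (max (pvGet2 dp j k) (pvGet2 dp (j - cnt0) (k - cnt1) + 1))) dp) dp) dp
  pvGet2 dp m n

-- ===== PRECONDITION & SPEC =====
-- Pre_ excludes m < 0 or n < 0: there Python A raises IndexError (dp[-1] on an empty
-- row list), and Python B raises IndexError as well.
def Pre_findMaxForm_2 (strs : List String) (m : Int) (n : Int) : Prop := 0 ≤ m ∧ 0 ≤ n
instance (strs : List String) (m : Int) (n : Int) : Decidable (Pre_findMaxForm_2 strs m n) := by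
  unfold Pre_findMaxForm_2; infer_instance

def pvWitness_findMaxForm_2 : List String × Int × Int := (["10", "0001", "1", "ab"], 2, 2)

def Spec_findMaxForm_2 (strs : List String) (m : Int) (n : Int) (out : Int) : Prop :=
  out = findMaxForm_2_alt strs m n
instance (strs : List String) (m : Int) (n : Int) (out : Int) : Decidable (Spec_findMaxForm_2 strs m n out) := by
  unfold Spec_findMaxForm_2; infer_instance

-- ===== CLAIM (what is proved, stated in full; the proofs are below) =====
def Claim_equal_findMaxForm_2 : Prop := ∀ (strs : List String) (m : Int) (n : Int), Dom_findMaxForm_2 strs m n → Pre_findMaxForm_2 strs m n → Spec_findMaxForm_2 strs m n (findMaxForm_2 strs m n)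

-- ===== LEMMAS AND PROOFS =====

def pvShape (m n : Int) (g : List (List Int)) : Prop :=
  g.length = (m + 1).toNat ∧ ∀ row ∈ g, row.length = (n + 1).toNat

theorem pvGet2_eq {g : List (List Int)} {j k : Int} (hj : 0 ≤ j) (hk : 0 ≤ k) :
    pvGet2 g j k = ((g[j.toNat]?.getD [])[k.toNat]?.getD 0) := by
  obtain ⟨jn, rfl⟩ : ∃ jn : Nat, j = (jn : Int) := ⟨j.toNat, (Int.toNat_of_nonneg hj).symm⟩
  obtain ⟨kn, rfl⟩ : ∃ kn : Nat, k = (kn : Int) := ⟨k.toNat, (Int.toNat_of_nonneg hk).symm⟩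
  simp [pvGet2, PySem.List.pyGetD_natCast, List.getD_eq_getElem?_getD]

theorem pvSet2_eq {g : List (List Int)} {j k : Int} {v : Int} (hj : 0 ≤ j) (hk : 0 ≤ k) :
    pvSet2 g j k v = g.set j.toNat ((g[j.toNat]?.getD []).set k.toNat v) := by
  obtain ⟨jn, rfl⟩ : ∃ jn : Nat, j = (jn : Int) := ⟨j.toNat, (Int.toNat_of_nonneg hj).symm⟩
  obtain ⟨kn, rfl⟩ : ∃ kn : Nat, k = (kn : Int) := ⟨k.toNat, (Int.toNat_of_nonneg hk).symm⟩
  simp [pvSet2, PySem.List.pySetD_of_nonneg, PySem.List.pyGetD_natCast, List.getD_eq_getElem?_getD]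

theorem pvShape_set2 {m n : Int} {g : List (List Int)} {j k : Int} {v : Int}
    (hg : pvShape m n g) (hj : 0 ≤ j) (hjm : j ≤ m) (hk : 0 ≤ k) :
    pvShape m n (pvSet2 g j k v) := by
  rw [pvSet2_eq hj hk]
  have hr : j.toNat < g.length := by rw [hg.1]; omega
  refine ⟨by simpa using hg.1, ?_⟩
  intro row hrow
  rcases List.mem_or_eq_of_mem_set hrow with h | rfl
  · exact hg.2 _ h
  · rw [List.length_set, List.getElem?_eq_getElem hr]
    exact hg.2 _ (by simp [List.getElem_mem])

theorem pvGet2_set2 {m n : Int} {g : List (List Int)} {j k a b : Int} {v : Int}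
    (hg : pvShape m n g) (hj : 0 ≤ j) (hjm : j ≤ m) (hk : 0 ≤ k) (hkn : k ≤ n)
    (ha : 0 ≤ a) (ham : a ≤ m) (hb : 0 ≤ b) (hbn : b ≤ n) :
    pvGet2 (pvSet2 g j k v) a b = if a = j ∧ b = k then v else pvGet2 g a b := by
  have hr : j.toNat < g.length := by rw [hg.1]; omega
  have hrowlen : (g[j.toNat]?.getD []).length = (n + 1).toNat := by
    rw [List.getElem?_eq_getElem hr]
    exact hg.2 _ (by simp [List.getElem_mem])
  rw [pvSet2_eq hj hk, pvGet2_eq ha hb, pvGet2_eq ha hb]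
  rw [List.getElem?_set]
  by_cases hja : j.toNat = a.toNat
  · have haj : a = j := by omega
    subst haj
    rw [if_pos hja, if_pos (hja ▸ hr)]
    simp only [Option.getD_some]
    rw [List.getElem?_set]
    by_cases hkb : k.toNat = b.toNat
    · have hbk : b = k := by omega
      subst hbk
      rw [if_pos hkb, if_pos (by rw [← hja] at hrowlen ⊢; omega)]
      simp
    · have hbk : ¬ (b = k) := by omega
      rw [if_neg hkb, if_neg (by tauto), hja]
      -- done
  · have haj : ¬ (a = j) := by omega
    rw [if_neg hja, if_neg (by tauto)]

theorem pvRep_init' (m n : Int) (hm : 0 ≤ m) (hn : 0 ≤ n) :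
    pvShape m n ((PySem.List.pyRange 0 (m + 1) 1).map (fun _ => PySem.List.pyRepeat [(0 : Int)] (n + 1))) ∧
    ∀ j k : Int, 0 ≤ j → j ≤ m → 0 ≤ k → k ≤ n →
      pvGet2 ((PySem.List.pyRange 0 (m + 1) 1).map (fun _ => PySem.List.pyRepeat [(0 : Int)] (n + 1))) j k = 0 := by
  constructor
  · constructor
    · simp [PySem.List.length_pyRange_one]
    · intro row hrow
      simp only [List.mem_map] at hrow
      obtain ⟨_, _, rfl⟩ := hrow
      simp [PySem.List.pyRepeat_singleton]
  · intro j k hj hjm hk hkn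
    rw [pvGet2_eq hj hk]
    have h1 : j.toNat < ((PySem.List.pyRange 0 (m + 1) 1).map (fun _ => PySem.List.pyRepeat [(0 : Int)] (n + 1))).length := by
      simp [PySem.List.length_pyRange_one]; omega
    rw [List.getElem?_eq_getElem h1]
    simp [PySem.List.pyRepeat_singleton]

def pvShape3 (L : Nat) (m n : Int) (dp : List (List (List Int))) : Prop :=
  dp.length = L ∧ ∀ pl ∈ dp, pvShape m n pl

theorem pvGet3_eq {dp : List (List (List Int))} {i : Int} (hi : 0 ≤ i) (j k : Int) :
    pvGet3 dp i j k = pvGet2 (dp[i.toNat]?.getD []) j k := by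
  obtain ⟨in_, rfl⟩ : ∃ x : Nat, i = (x : Int) := ⟨i.toNat, (Int.toNat_of_nonneg hi).symm⟩
  simp [pvGet3, PySem.List.pyGetD_natCast, List.getD_eq_getElem?_getD]

theorem pvSet3_eq {dp : List (List (List Int))} {i : Int} (hi : 0 ≤ i) (j k v : Int) :
    pvSet3 dp i j k v = dp.set i.toNat (pvSet2 (dp[i.toNat]?.getD []) j k v) := by
  obtain ⟨in_, rfl⟩ : ∃ x : Nat, i = (x : Int) := ⟨i.toNat, (Int.toNat_of_nonneg hi).symm⟩
  simp [pvSet3, PySem.List.pySetD_of_nonneg, PySem.List.pyGetD_natCast, List.getD_eq_getElem?_getD]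

theorem pvPlane_set3 {dp : List (List (List Int))} {i j k p : Int} {v : Int}
    (hi : 0 ≤ i) (hp0 : 0 ≤ p) (hp : p ≠ i) :
    PySem.List.pyGetD (pvSet3 dp i j k v) p [] = PySem.List.pyGetD dp p [] := by
  obtain ⟨pn, rfl⟩ : ∃ x : Nat, p = (x : Int) := ⟨p.toNat, (Int.toNat_of_nonneg hp0).symm⟩
  rw [pvSet3_eq hi]
  simp only [PySem.List.pyGetD_natCast, List.getD_eq_getElem?_getD]
  rw [List.getElem?_set, if_neg (by omega)]

theorem pvShape3_set3 {L : Nat} {m n : Int} {dp : List (List (List Int))} {i j k : Int} {v : Int}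
    (hdp : pvShape3 L m n dp) (hi : 0 ≤ i) (hiL : i < (L : Int))
    (hj : 0 ≤ j) (hjm : j ≤ m) (hk : 0 ≤ k) :
    pvShape3 L m n (pvSet3 dp i j k v) := by
  rw [pvSet3_eq hi]
  have hr : i.toNat < dp.length := by rw [hdp.1]; omega
  refine ⟨by simpa using hdp.1, ?_⟩
  intro pl hpl
  rcases List.mem_or_eq_of_mem_set hpl with h | rfl
  · exact hdp.2 _ h
  · rw [List.getElem?_eq_getElem hr]
    exact pvShape_set2 (hdp.2 _ (by simp [List.getElem_mem])) hj hjm hk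

theorem pvGet3_set3 {L : Nat} {m n : Int} {dp : List (List (List Int))} {i j k a b c : Int} {v : Int}
    (hdp : pvShape3 L m n dp) (hi : 0 ≤ i) (hiL : i < (L : Int))
    (hj : 0 ≤ j) (hjm : j ≤ m) (hk : 0 ≤ k) (hkn : k ≤ n)
    (ha : 0 ≤ a) (haL : a < (L : Int)) (hb : 0 ≤ b) (hbm : b ≤ m) (hc : 0 ≤ c) (hcn : c ≤ n) :
    pvGet3 (pvSet3 dp i j k v) a b c = if a = i ∧ b = j ∧ c = k then v else pvGet3 dp a b c := by
  have hr : i.toNat < dp.length := by rw [hdp.1]; omega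
  rw [pvGet3_eq ha, pvGet3_eq ha, pvSet3_eq hi]
  rw [List.getElem?_set]
  by_cases hia : i.toNat = a.toNat
  · have : a = i := by omega
    subst this
    rw [if_pos hia, if_pos (hia ▸ hr)]
    simp only [Option.getD_some]
    rw [hia, pvGet2_set2 (hdp.2 _ (by rw [List.getElem?_eq_getElem (hia ▸ hr)]; simp [List.getElem_mem])) hj hjm hk hkn hb hbm hc hcn]
    by_cases h2 : b = j ∧ c = k
    · rw [if_pos h2, if_pos (by simp [h2.1, h2.2])]
    · rw [if_neg h2, if_neg (by tauto)]
  · have : ¬ (a = i) := by omega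
    rw [if_neg hia, if_neg (by tauto)]

theorem pvB_kloop (m n c0 c1 j : Int) (hm : 0 ≤ m) (hn : 0 ≤ n) (hc0 : 0 ≤ c0) (hc1 : 0 ≤ c1)
    (hjc : c0 ≤ j) (hjm : j ≤ m) (o : Int → Int → Int) :
    ∀ (t : Nat) (b : Int) (g : List (List Int)), b ≤ n → t = (b - c1 + 1).toNat →
    pvShape m n g →
    (∀ k, 0 ≤ k → k ≤ b → pvGet2 g j k = o j k) →
    (∀ k, 0 ≤ k → k ≤ n → c0 = 0 ∨ pvGet2 g (j - c0) k = o (j - c0) k) →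
    pvShape m n ((PySem.List.pyRange b (c1 - 1) (-1)).foldl
        (fun dp k => pvSet2 dp j k (max (pvGet2 dp j k) (pvGet2 dp (j - c0) (k - c1) + 1))) g) ∧
    (∀ a b', 0 ≤ a → a ≤ m → 0 ≤ b' → b' ≤ n → a ≠ j →
      pvGet2 ((PySem.List.pyRange b (c1 - 1) (-1)).foldl
        (fun dp k => pvSet2 dp j k (max (pvGet2 dp j k) (pvGet2 dp (j - c0) (k - c1) + 1))) g) a b'
        = pvGet2 g a b') ∧
    (∀ k, 0 ≤ k → k ≤ n →
      pvGet2 ((PySem.List.pyRange b (c1 - 1) (-1)).foldl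
        (fun dp k => pvSet2 dp j k (max (pvGet2 dp j k) (pvGet2 dp (j - c0) (k - c1) + 1))) g) j k
        = if c1 ≤ k ∧ k ≤ b then max (o j k) (o (j - c0) (k - c1) + 1) else pvGet2 g j k) := by
  have hj0 : 0 ≤ j := le_trans hc0 hjc
  intro t
  induction t with
  | zero =>
    intro b g hbn ht hsh H1 H2
    rw [PySem.List.pyRange_neg_one_eq_nil (by omega)]
    simp only [List.foldl_nil]
    refine ⟨hsh, ?_, ?_⟩
    · intro a b' _ _ _ _ _
      trivial
    · intro k _ _
      rw [if_neg (by omega)]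
  | succ t ih =>
    intro b g hbn ht hsh H1 H2
    have hbc1 : c1 ≤ b := by omega
    have hb0 : 0 ≤ b := by omega
    rw [PySem.List.pyRange_neg_one_cons (by omega)]
    simp only [List.foldl_cons]
    have hread2 : pvGet2 g (j - c0) (b - c1) = o (j - c0) (b - c1) := by
      by_cases hc : c0 = 0
      · rw [hc, sub_zero]
        exact H1 (b - c1) (by omega) (by omega)
      · rcases H2 (b - c1) (by omega) (by omega) with h | h
        · exact absurd h hc
        · exact h
    have hval : max (pvGet2 g j b) (pvGet2 g (j - c0) (b - c1) + 1)
        = max (o j b) (o (j - c0) (b - c1) + 1) := by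
      rw [H1 b hb0 le_rfl, hread2]
    have hsh1 : pvShape m n (pvSet2 g j b (max (pvGet2 g j b) (pvGet2 g (j - c0) (b - c1) + 1))) :=
      pvShape_set2 hsh hj0 hjm hb0
    have hset := fun (a b' : Int) (ha : 0 ≤ a) (ham : a ≤ m) (hb' : 0 ≤ b') (hbn' : b' ≤ n) =>
      pvGet2_set2 (g := g) (v := max (pvGet2 g j b) (pvGet2 g (j - c0) (b - c1) + 1))
        hsh hj0 hjm hb0 hbn ha ham hb' hbn'
    have key := ih (b - 1) _ (by omega) (by omega) hsh1
      (fun k hk hkb => by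
        rw [hset j k hj0 hjm hk (by omega), if_neg (by omega)]
        exact H1 k hk (by omega))
      (fun k hk hkn => by
        by_cases hc : c0 = 0
        · exact Or.inl hc
        · refine Or.inr ?_
          rw [hset (j - c0) k (by omega) (by omega) hk hkn, if_neg (by omega)]
          rcases H2 k hk hkn with h | h
          · exact absurd h hc
          · exact h)
    refine ⟨key.1, ?_, ?_⟩
    · intro a b' ha ham hb' hbn' haj
      rw [key.2.1 a b' ha ham hb' hbn' haj, hset a b' ha ham hb' hbn', if_neg (by tauto)]
    · intro k hk hkn
      rw [key.2.2 k hk hkn]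
      by_cases h1 : c1 ≤ k ∧ k ≤ b - 1
      · rw [if_pos h1, if_pos (by omega)]
      · rw [if_neg h1]
        by_cases h2 : k = b
        · rw [h2]
          rw [hset j b hj0 hjm hb0 hbn, if_pos ⟨rfl, rfl⟩, if_pos (by omega)]
          exact hval
        · rw [hset j k hj0 hjm hk hkn, if_neg (by omega), if_neg (by omega)]

def pvStep (c0 c1 : Int) (f : Int → Int → Int) : Int → Int → Int :=
  fun j k => if c0 ≤ j ∧ c1 ≤ k then max (f j k) (f (j - c0) (k - c1) + 1) else f j k

def pvRep (m n : Int) (g : List (List Int)) (f : Int → Int → Int) : Prop :=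
  pvShape m n g ∧ ∀ j k : Int, 0 ≤ j → j ≤ m → 0 ≤ k → k ≤ n → pvGet2 g j k = f j k

theorem pvB_jloop (m n c0 c1 : Int) (hm : 0 ≤ m) (hn : 0 ≤ n) (hc0 : 0 ≤ c0) (hc1 : 0 ≤ c1)
    (f : Int → Int → Int) :
    ∀ (t : Nat) (a : Int) (g : List (List Int)), a ≤ m → t = (a - c0 + 1).toNat →
    pvShape m n g →
    (∀ j k, 0 ≤ j → j ≤ m → 0 ≤ k → k ≤ n →
      pvGet2 g j k = if a < j then pvStep c0 c1 f j k else f j k) →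
    pvRep m n ((PySem.List.pyRange a (c0 - 1) (-1)).foldl
        (fun dp j => (PySem.List.pyRange n (c1 - 1) (-1)).foldl
          (fun dp k => pvSet2 dp j k (max (pvGet2 dp j k) (pvGet2 dp (j - c0) (k - c1) + 1))) dp) g)
      (pvStep c0 c1 f) := by
  intro t
  induction t with
  | zero =>
    intro a g ham ht hsh H
    rw [PySem.List.pyRange_neg_one_eq_nil (a := a) (b := c0 - 1) (by omega)]
    simp only [List.foldl_nil]
    refine ⟨hsh, ?_⟩
    intro j k hj hjm hk hkn
    rw [H j k hj hjm hk hkn]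
    by_cases haj : a < j
    · rw [if_pos haj]
    · rw [if_neg haj, pvStep]
      rw [if_neg (by omega)]
  | succ t ih =>
    intro a g ham ht hsh H
    have ha0 : 0 ≤ a := by omega
    have hac0 : c0 ≤ a := by omega
    rw [PySem.List.pyRange_neg_one_cons (a := a) (b := c0 - 1) (by omega)]
    simp only [List.foldl_cons]
    have key := pvB_kloop m n c0 c1 a hm hn hc0 hc1 hac0 ham f
      (n - c1 + 1).toNat n g le_rfl rfl hsh
      (fun k hk hkn => by rw [H a k ha0 ham hk hkn, if_neg (by omega)])
      (fun k hk hkn => by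
        by_cases hc : c0 = 0
        · exact Or.inl hc
        · refine Or.inr ?_
          rw [H (a - c0) k (by omega) (by omega) hk hkn, if_neg (by omega)])
    refine ih (a - 1) _ (by omega) (by omega) key.1 ?_
    intro j k hj hjm hk hkn
    by_cases hja : j = a
    · subst hja
      rw [key.2.2 k hk hkn]
      by_cases h1 : c1 ≤ k
      · rw [if_pos ⟨h1, hkn⟩, if_pos (by omega), pvStep]
        rw [if_pos ⟨hac0, h1⟩]
      · rw [if_neg (by tauto), if_pos (by omega), pvStep, if_neg (by tauto)]
        rw [H j k hj hjm hk hkn, if_neg (by omega)]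
    · rw [key.2.1 j k hj hjm hk hkn hja, H j k hj hjm hk hkn]
      by_cases h2 : a < j
      · rw [if_pos h2, if_pos (by omega)]
      · rw [if_neg h2, if_neg (by omega)]


theorem pvCount_go_le (sub : List Char) (hs : sub ≠ []) :
    ∀ (fuel : Nat) (l : List Char) (acc : Nat), PySem.Chars.count.go sub fuel l acc ≤ acc + l.length := by
  intro fuel
  induction fuel with
  | zero => intro l acc; simp [PySem.Chars.count.go]
  | succ fuel ih =>
    intro l acc
    cases l with
    | nil => simp [PySem.Chars.count.go]
    | cons h t =>
      rw [PySem.Chars.count.go]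
      split
      · have h1 := ih (List.drop sub.length (h :: t)) (acc + 1)
        have h2 : sub.length ≥ 1 := by cases sub <;> simp_all
        have h3 : (List.drop sub.length (h :: t)).length = (h :: t).length - sub.length := List.length_drop
        simp only [List.length_cons] at *
        omega
      · have := ih t acc
        simp
        omega

theorem pvCnt1_nonneg' (s : String) : 0 ≤ PySem.Str.len s - (PySem.Str.count s "0" : Int) := by
  rw [PySem.Str.count_eq, PySem.Str.len_eq]
  have : PySem.Chars.count s.toList "0".toList ≤ s.toList.length := by
    rw [PySem.Chars.count]
    simp only [List.isEmpty_iff]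
    split
    · simp_all
    · exact le_trans (pvCount_go_le _ (by simp_all) _ _ _) (by omega)
  omega


def pvCnt0 (s : String) : Int := (PySem.Str.count s "0" : Int)
def pvCnt1 (s : String) : Int := PySem.Str.len s - pvCnt0 s

theorem pvCnt1_nonneg (s : String) : 0 ≤ pvCnt1 s := pvCnt1_nonneg' s

def pvF (strs : List String) : Int → Int → Int :=
  strs.foldl (fun f s => pvStep (pvCnt0 s) (pvCnt1 s) f) (fun _ _ => 0)

theorem pvB_item (m n : Int) (hm : 0 ≤ m) (hn : 0 ≤ n) (s : String)
    (g : List (List Int)) (f : Int → Int → Int) (hrep : pvRep m n g f) :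
    pvRep m n ((PySem.List.pyRange m ((PySem.Str.count s "0" : Int) - 1) (-1)).foldl
        (fun dp j => (PySem.List.pyRange n ((PySem.Str.len s - (PySem.Str.count s "0" : Int)) - 1) (-1)).foldl
          (fun dp k => pvSet2 dp j k
            (max (pvGet2 dp j k)
                 (pvGet2 dp (j - (PySem.Str.count s "0" : Int))
                          (k - (PySem.Str.len s - (PySem.Str.count s "0" : Int))) + 1))) dp) g)
      (pvStep (pvCnt0 s) (pvCnt1 s) f) := by
  have h0 : 0 ≤ pvCnt0 s := Int.natCast_nonneg _
  have h1 : 0 ≤ pvCnt1 s := pvCnt1_nonneg s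
  have := pvB_jloop m n (pvCnt0 s) (pvCnt1 s) hm hn h0 h1 f
    (m - pvCnt0 s + 1).toNat m g le_rfl rfl hrep.1
    (fun j k hj hjm hk hkn => by
      rw [hrep.2 j k hj hjm hk hkn, if_neg (by omega)])
  exact this

theorem pvB_fold (m n : Int) (hm : 0 ≤ m) (hn : 0 ≤ n) :
    ∀ (ss : List String) (g : List (List Int)) (f : Int → Int → Int), pvRep m n g f →
    pvRep m n (ss.foldl (fun dp s =>
        (PySem.List.pyRange m ((PySem.Str.count s "0" : Int) - 1) (-1)).foldl
          (fun dp j => (PySem.List.pyRange n ((PySem.Str.len s - (PySem.Str.count s "0" : Int)) - 1) (-1)).foldl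
            (fun dp k => pvSet2 dp j k
              (max (pvGet2 dp j k)
                   (pvGet2 dp (j - (PySem.Str.count s "0" : Int))
                            (k - (PySem.Str.len s - (PySem.Str.count s "0" : Int))) + 1))) dp) dp) g)
      (ss.foldl (fun f s => pvStep (pvCnt0 s) (pvCnt1 s) f) f) := by
  intro ss
  induction ss with
  | nil => intro g f h; simpa using h
  | cons s ss ih =>
    intro g f h
    simp only [List.foldl_cons]
    exact ih _ _ (pvB_item m n hm hn s g f h)



theorem pvB_result (strs : List String) (m n : Int) (hm : 0 ≤ m) (hn : 0 ≤ n) :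
    findMaxForm_2_alt strs m n = pvF strs m n := by
  have hinit := pvRep_init' m n hm hn
  have := pvB_fold m n hm hn strs
    ((PySem.List.pyRange 0 (m + 1) 1).map (fun _ => PySem.List.pyRepeat [(0 : Int)] (n + 1)))
    (fun _ _ => 0) ⟨hinit.1, hinit.2⟩
  unfold findMaxForm_2_alt
  exact this.2 m n hm le_rfl hn le_rfl

theorem pvGet3_plane_congr {dp dp' : List (List (List Int))} {p : Int}
    (h : PySem.List.pyGetD dp' p [] = PySem.List.pyGetD dp p []) (j k : Int) :
    pvGet3 dp' p j k = pvGet3 dp p j k := by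
  simp [pvGet3, h]

theorem pvA_kloop (L : Nat) (m n c0 c1 i j : Int) (hm : 0 ≤ m) (hn : 0 ≤ n)
    (hc0 : 0 ≤ c0) (hc1 : 0 ≤ c1) (hi : 0 ≤ i) (hiL : i + 1 < (L : Int))
    (hj : 0 ≤ j) (hjm : j ≤ m) (f : Int → Int → Int) :
    ∀ (t : Nat) (a : Int) (dp : List (List (List Int))), 0 ≤ a → t = (n + 1 - a).toNat →
    pvShape3 L m n dp →
    (∀ j' k', 0 ≤ j' → j' ≤ m → 0 ≤ k' → k' ≤ n → pvGet3 dp i j' k' = f j' k') →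
    pvShape3 L m n ((PySem.List.pyRange a (n + 1) 1).foldl (fun dp k =>
        if c0 ≤ j ∧ c1 ≤ k then
          pvSet3 dp (i + 1) j k (max (pvGet3 dp i j k) (pvGet3 dp i (j - c0) (k - c1) + 1))
        else pvSet3 dp (i + 1) j k (pvGet3 dp i j k)) dp) ∧
    (∀ p, 0 ≤ p → p ≠ i + 1 →
      PySem.List.pyGetD ((PySem.List.pyRange a (n + 1) 1).foldl (fun dp k =>
        if c0 ≤ j ∧ c1 ≤ k then
          pvSet3 dp (i + 1) j k (max (pvGet3 dp i j k) (pvGet3 dp i (j - c0) (k - c1) + 1))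
        else pvSet3 dp (i + 1) j k (pvGet3 dp i j k)) dp) p []
      = PySem.List.pyGetD dp p []) ∧
    (∀ b c, 0 ≤ b → b ≤ m → 0 ≤ c → c ≤ n →
      pvGet3 ((PySem.List.pyRange a (n + 1) 1).foldl (fun dp k =>
        if c0 ≤ j ∧ c1 ≤ k then
          pvSet3 dp (i + 1) j k (max (pvGet3 dp i j k) (pvGet3 dp i (j - c0) (k - c1) + 1))
        else pvSet3 dp (i + 1) j k (pvGet3 dp i j k)) dp) (i + 1) b c
      = if b = j ∧ a ≤ c then pvStep c0 c1 f j c else pvGet3 dp (i + 1) b c) := by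
  intro t
  induction t with
  | zero =>
    intro a dp ha0 ht hsh H
    rw [PySem.List.pyRange_one_eq_nil (by omega)]
    simp only [List.foldl_nil]
    refine ⟨hsh, ?_, ?_⟩
    · intro p _ _
      trivial
    · intro b c _ _ _ hcn
      rw [if_neg (by omega)]
  | succ t ih =>
    intro a dp ha0 ht hsh H
    have han : a ≤ n := by omega
    rw [PySem.List.pyRange_one_cons (by omega)]
    simp only [List.foldl_cons]
    rw [← apply_ite (pvSet3 dp (i + 1) j a)]
    have hval : (if c0 ≤ j ∧ c1 ≤ a then max (pvGet3 dp i j a) (pvGet3 dp i (j - c0) (a - c1) + 1)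
        else pvGet3 dp i j a) = pvStep c0 c1 f j a := by
      rw [pvStep]
      by_cases hcond : c0 ≤ j ∧ c1 ≤ a
      · rw [if_pos hcond, if_pos hcond, H j a hj hjm ha0 han,
          H (j - c0) (a - c1) (by omega) (by omega) (by omega) (by omega)]
      · rw [if_neg hcond, if_neg hcond, H j a hj hjm ha0 han]
    rw [hval]
    have hplane := fun (p : Int) (hp0 : 0 ≤ p) (hp : p ≠ i + 1) =>
      pvPlane_set3 (dp := dp) (i := i + 1) (j := j) (k := a) (v := pvStep c0 c1 f j a) (by omega) hp0 hp
    have hsh1 := pvShape3_set3 (i := i + 1) (k := a) (v := pvStep c0 c1 f j a) hsh (by omega) (by omega) hj hjm ha0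
    have key := ih (a + 1) _ (by omega) (by omega) hsh1
      (fun j' k' hj' hjm' hk' hkn' => by
        rw [pvGet3_plane_congr (hplane i hi (by omega)) j' k']
        exact H j' k' hj' hjm' hk' hkn')
    refine ⟨key.1, ?_, ?_⟩
    · intro p hp0 hp
      rw [key.2.1 p hp0 hp, hplane p hp0 hp]
    · intro b c hb hbm hc hcn
      rw [key.2.2 b c hb hbm hc hcn]
      have hset := pvGet3_set3 (i := i + 1) (k := a) (v := pvStep c0 c1 f j a) hsh (by omega) (by omega) hj hjm ha0 han
        (by omega : (0:Int) ≤ i + 1) (by omega) hb hbm hc hcn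
      by_cases h1 : b = j ∧ a + 1 ≤ c
      · rw [if_pos h1, if_pos (by omega)]
      · rw [if_neg h1, hset]
        by_cases h2 : b = j ∧ c = a
        · rw [if_pos ⟨rfl, h2.1, h2.2⟩, if_pos (by omega)]
          rw [h2.2]
        · rw [if_neg (by tauto), if_neg (by omega)]

theorem pvA_jloop (L : Nat) (m n c0 c1 i : Int) (hm : 0 ≤ m) (hn : 0 ≤ n)
    (hc0 : 0 ≤ c0) (hc1 : 0 ≤ c1) (hi : 0 ≤ i) (hiL : i + 1 < (L : Int)) (f : Int → Int → Int) :
    ∀ (t : Nat) (a : Int) (dp : List (List (List Int))), 0 ≤ a → t = (m + 1 - a).toNat →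
    pvShape3 L m n dp →
    (∀ j' k', 0 ≤ j' → j' ≤ m → 0 ≤ k' → k' ≤ n → pvGet3 dp i j' k' = f j' k') →
    pvShape3 L m n ((PySem.List.pyRange a (m + 1) 1).foldl (fun dp j =>
        (PySem.List.pyRange 0 (n + 1) 1).foldl (fun dp k =>
          if c0 ≤ j ∧ c1 ≤ k then
            pvSet3 dp (i + 1) j k (max (pvGet3 dp i j k) (pvGet3 dp i (j - c0) (k - c1) + 1))
          else pvSet3 dp (i + 1) j k (pvGet3 dp i j k)) dp) dp) ∧
    (∀ p, 0 ≤ p → p ≠ i + 1 →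
      PySem.List.pyGetD ((PySem.List.pyRange a (m + 1) 1).foldl (fun dp j =>
        (PySem.List.pyRange 0 (n + 1) 1).foldl (fun dp k =>
          if c0 ≤ j ∧ c1 ≤ k then
            pvSet3 dp (i + 1) j k (max (pvGet3 dp i j k) (pvGet3 dp i (j - c0) (k - c1) + 1))
          else pvSet3 dp (i + 1) j k (pvGet3 dp i j k)) dp) dp) p []
      = PySem.List.pyGetD dp p []) ∧
    (∀ b c, 0 ≤ b → b ≤ m → 0 ≤ c → c ≤ n →
      pvGet3 ((PySem.List.pyRange a (m + 1) 1).foldl (fun dp j =>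
        (PySem.List.pyRange 0 (n + 1) 1).foldl (fun dp k =>
          if c0 ≤ j ∧ c1 ≤ k then
            pvSet3 dp (i + 1) j k (max (pvGet3 dp i j k) (pvGet3 dp i (j - c0) (k - c1) + 1))
          else pvSet3 dp (i + 1) j k (pvGet3 dp i j k)) dp) dp) (i + 1) b c
      = if a ≤ b then pvStep c0 c1 f b c else pvGet3 dp (i + 1) b c) := by
  intro t
  induction t with
  | zero =>
    intro a dp ha0 ht hsh H
    rw [PySem.List.pyRange_one_eq_nil (a := a) (b := m + 1) (by omega)]
    simp only [List.foldl_nil]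
    refine ⟨hsh, ?_, ?_⟩
    · intro p _ _
      trivial
    · intro b c _ hbm _ _
      rw [if_neg (by omega)]
  | succ t ih =>
    intro a dp ha0 ht hsh H
    have ham : a ≤ m := by omega
    rw [PySem.List.pyRange_one_cons (a := a) (b := m + 1) (by omega)]
    simp only [List.foldl_cons]
    have key1 := pvA_kloop L m n c0 c1 i a hm hn hc0 hc1 hi hiL ha0 ham f
      (n + 1 - 0).toNat 0 dp le_rfl rfl hsh H
    have key := ih (a + 1) _ (by omega) (by omega) key1.1
      (fun j' k' hj' hjm' hk' hkn' => by
        rw [pvGet3_plane_congr (key1.2.1 i hi (by omega)) j' k']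
        exact H j' k' hj' hjm' hk' hkn')
    refine ⟨key.1, ?_, ?_⟩
    · intro p hp0 hp
      rw [key.2.1 p hp0 hp, key1.2.1 p hp0 hp]
    · intro b c hb hbm hc hcn
      rw [key.2.2 b c hb hbm hc hcn]
      by_cases h1 : a + 1 ≤ b
      · rw [if_pos h1, if_pos (by omega)]
      · rw [if_neg h1, key1.2.2 b c hb hbm hc hcn]
        by_cases h2 : b = a
        · rw [if_pos ⟨h2, hc⟩, if_pos (by omega), h2]
        · rw [if_neg (by tauto), if_neg (by omega)]

theorem pvGet2_neg {m n : Int} {pl : List (List Int)} (hsh : pvShape m n pl)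
    (hm : 0 ≤ m) (hn : 0 ≤ n) : pvGet2 pl (-1) (-1) = pvGet2 pl m n := by
  have hne : pl ≠ [] := by
    intro h; rw [h] at hsh; have := hsh.1; simp at this; omega
  rw [pvGet2_eq hm hn, pvGet2]
  rw [PySem.List.pyGetD_neg_one _ _ hne, List.getLast_eq_getElem]
  have hlen : pl.length - 1 = m.toNat := by have := hsh.1; omega
  have hmr : m.toNat < pl.length := by have := hsh.1; omega
  rw [List.getElem?_eq_getElem hmr]
  simp only [Option.getD_some, hlen]
  have hrowne : pl[m.toNat] ≠ [] := by
    intro h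
    have := hsh.2 pl[m.toNat] (List.getElem_mem _)
    rw [h] at this; simp at this; omega
  rw [PySem.List.pyGetD_neg_one _ _ hrowne, List.getLast_eq_getElem]
  have hrl := hsh.2 pl[m.toNat] (List.getElem_mem _)
  have hnr : n.toNat < pl[m.toNat].length := by omega
  rw [List.getElem?_eq_getElem hnr]
  simp only [Option.getD_some]
  congr 1
  omega

theorem pvGet3_neg {L : Nat} {m n : Int} {dp : List (List (List Int))}
    (hsh3 : pvShape3 L m n dp) (hL : 0 < L) (hm : 0 ≤ m) (hn : 0 ≤ n) :
    pvGet3 dp (-1) (-1) (-1) = pvGet3 dp ((L : Int) - 1) m n := by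
  have hne : dp ≠ [] := by
    intro h; rw [h] at hsh3; have := hsh3.1; simp at this; omega
  rw [pvGet3_eq (i := (L : Int) - 1) (by omega) m n]
  rw [pvGet3, PySem.List.pyGetD_neg_one _ _ hne, List.getLast_eq_getElem]
  have hr : ((L : Int) - 1).toNat < dp.length := by rw [hsh3.1]; omega
  rw [List.getElem?_eq_getElem hr]
  simp only [Option.getD_some]
  have h2 : dp.length - 1 = ((L : Int) - 1).toNat := by rw [hsh3.1]; omega
  simp only [h2]
  exact pvGet2_neg (hsh3.2 _ (List.getElem_mem _)) hm hn

theorem pvA_fold (L : Nat) (m n : Int) (hm : 0 ≤ m) (hn : 0 ≤ n) :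
    ∀ (ss : List String) (i : Int) (dp : List (List (List Int))) (f : Int → Int → Int),
    0 ≤ i → i + ss.length + 1 ≤ (L : Int) →
    pvShape3 L m n dp →
    (∀ j' k', 0 ≤ j' → j' ≤ m → 0 ≤ k' → k' ≤ n → pvGet3 dp i j' k' = f j' k') →
    pvShape3 L m n ((PySem.List.enumerate ss i).foldl (fun dp p =>
        (PySem.List.pyRange 0 (m + 1) 1).foldl (fun dp j =>
          (PySem.List.pyRange 0 (n + 1) 1).foldl (fun dp k =>
            if (PySem.Str.count p.2 "0" : Int) ≤ j ∧ PySem.Str.len p.2 - (PySem.Str.count p.2 "0" : Int) ≤ k then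
              pvSet3 dp (p.1 + 1) j k
                (max (pvGet3 dp p.1 j k)
                     (pvGet3 dp p.1 (j - (PySem.Str.count p.2 "0" : Int))
                              (k - (PySem.Str.len p.2 - (PySem.Str.count p.2 "0" : Int))) + 1))
            else pvSet3 dp (p.1 + 1) j k (pvGet3 dp p.1 j k)) dp) dp) dp) ∧
    (∀ j' k', 0 ≤ j' → j' ≤ m → 0 ≤ k' → k' ≤ n →
      pvGet3 ((PySem.List.enumerate ss i).foldl (fun dp p =>
        (PySem.List.pyRange 0 (m + 1) 1).foldl (fun dp j =>
          (PySem.List.pyRange 0 (n + 1) 1).foldl (fun dp k =>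
            if (PySem.Str.count p.2 "0" : Int) ≤ j ∧ PySem.Str.len p.2 - (PySem.Str.count p.2 "0" : Int) ≤ k then
              pvSet3 dp (p.1 + 1) j k
                (max (pvGet3 dp p.1 j k)
                     (pvGet3 dp p.1 (j - (PySem.Str.count p.2 "0" : Int))
                              (k - (PySem.Str.len p.2 - (PySem.Str.count p.2 "0" : Int))) + 1))
            else pvSet3 dp (p.1 + 1) j k (pvGet3 dp p.1 j k)) dp) dp) dp) (i + ss.length) j' k'
      = ss.foldl (fun f s => pvStep (pvCnt0 s) (pvCnt1 s) f) f j' k') := by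
  intro ss
  induction ss with
  | nil =>
    intro i dp f hi hiL hsh H
    simp only [PySem.List.enumerate_nil, List.foldl_nil, List.length_nil, Nat.cast_zero, add_zero]
    exact ⟨hsh, H⟩
  | cons s ss ih =>
    intro i dp f hi hiL hsh H
    simp only [PySem.List.enumerate_cons, List.foldl_cons]
    have hc1 : 0 ≤ PySem.Str.len s - (PySem.Str.count s "0" : Int) := pvCnt1_nonneg' s
    have hjl := pvA_jloop L m n (PySem.Str.count s "0" : Int)
      (PySem.Str.len s - (PySem.Str.count s "0" : Int)) i hm hn (Int.natCast_nonneg _) hc1 hi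
      (by simp at hiL ⊢; omega) f (m + 1 - 0).toNat 0 dp le_rfl rfl hsh H
    have key := ih (i + 1) _ (pvStep (pvCnt0 s) (pvCnt1 s) f) (by omega)
      (by simp at hiL ⊢; omega) hjl.1
      (fun j' k' hj' hjm' hk' hkn' => by
        rw [hjl.2.2 j' k' hj' hjm' hk' hkn', if_pos hj']
        rfl)
    have harith : i + ((s :: ss).length : Int) = (i + 1) + (ss.length : Int) := by
      simp; omega
    rw [harith]
    exact key



theorem pvA_result (strs : List String) (m n : Int) (hm : 0 ≤ m) (hn : 0 ≤ n) :
    findMaxForm_2 strs m n = pvF strs m n := by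
  have hinit := pvRep_init' m n hm hn
  have hsh0 : pvShape3 (strs.length + 1) m n
      ((PySem.List.pyRange 0 ((strs.length : Int) + 1) 1).map (fun _ =>
        (PySem.List.pyRange 0 (m + 1) 1).map (fun _ => PySem.List.pyRepeat [(0 : Int)] (n + 1)))) := by
    constructor
    · simp [PySem.List.length_pyRange_one]
    · intro pl hpl
      simp only [List.mem_map] at hpl
      obtain ⟨_, _, rfl⟩ := hpl
      exact hinit.1
  have h0 : ∀ j' k', 0 ≤ j' → j' ≤ m → 0 ≤ k' → k' ≤ n →
      pvGet3 ((PySem.List.pyRange 0 ((strs.length : Int) + 1) 1).map (fun _ =>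
        (PySem.List.pyRange 0 (m + 1) 1).map (fun _ => PySem.List.pyRepeat [(0 : Int)] (n + 1))))
        0 j' k' = 0 := by
    intro j' k' hj' hjm' hk' hkn'
    rw [pvGet3_eq le_rfl]
    have hl : (0 : Int).toNat < ((PySem.List.pyRange 0 ((strs.length : Int) + 1) 1).map (fun _ =>
        (PySem.List.pyRange 0 (m + 1) 1).map (fun _ => PySem.List.pyRepeat [(0 : Int)] (n + 1)))).length := by
      simp [PySem.List.length_pyRange_one]
    rw [List.getElem?_eq_getElem hl]
    simp only [Option.getD_some, List.getElem_map]
    exact hinit.2 j' k' hj' hjm' hk' hkn'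
  have main := pvA_fold (strs.length + 1) m n hm hn strs 0 _ (fun _ _ => 0) le_rfl
    (by push_cast; omega) hsh0 h0
  unfold findMaxForm_2
  rw [pvGet3_neg main.1 (by omega) hm hn]
  have harith : ((strs.length + 1 : Nat) : Int) - 1 = 0 + (strs.length : Int) := by push_cast; omega
  rw [harith]
  exact main.2 m n hm le_rfl hn le_rfl

-- ===== VERDICT (by name: the statement is the Claim_ definition above) =====
theorem findMaxForm_2_spec : Claim_equal_findMaxForm_2 := by
  intro strs m n _ hpre
  unfold Spec_findMaxForm_2
  rw [pvA_result strs m n hpre.1 hpre.2, pvB_result strs m n hpre.1 hpre.2]
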